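-- pv_equiv track=rewrite | github.com/priyanka-golia/priyanka-golia.github.io | teaching/COL-750-COL7250/a2/demo_light/models_vocab.py | maybe_or
-- ===== SOURCE A (Python) =====
-- def maybe_or(vs):
--     """
--     True if any True, False if all False, None if any None and no True.
--     """
--     result = False
--     for v in vs:
--         if v is True:
--             return True
--         if v is None:
--             result = None
--     return result
-- ===== SOURCE B (Python) =====
-- def maybe_or(vs):
--     """
--     True if any True, False if all False, None if any None and no True.
--     """
--     xs = list(vs)
--     if any(v is True for v in xs):
--         return True
--     if any(v is None for v in xs):
--         return None
--     return False
-- ===== Notes on version B (the rewrite author's own statement) =====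
-- stated objective: simpler
-- what changed: Replaces the single stateful loop that tracks a result flag with two independent short-circuit any() scans (materializing the iterable first), one per outcome.
import Mathlib
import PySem

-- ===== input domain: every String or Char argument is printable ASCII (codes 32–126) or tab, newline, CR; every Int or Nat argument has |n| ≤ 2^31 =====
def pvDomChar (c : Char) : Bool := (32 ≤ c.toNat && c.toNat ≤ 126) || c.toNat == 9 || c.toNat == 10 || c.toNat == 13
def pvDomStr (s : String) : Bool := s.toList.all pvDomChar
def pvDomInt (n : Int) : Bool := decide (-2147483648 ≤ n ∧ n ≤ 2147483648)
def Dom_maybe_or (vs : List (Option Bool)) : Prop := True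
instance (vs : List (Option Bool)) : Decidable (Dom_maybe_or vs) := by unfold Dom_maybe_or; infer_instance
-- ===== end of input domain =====

-- B replaces the single stateful loop with two short-circuit scans (simpler); exact equivalence proved.
-- ===== PORT A =====
-- A's loop: early-return on `some true`, set result to none on `none`, else keep result
def maybe_orLoop (result : Option Bool) : List (Option Bool) → Option Bool
  | [] => result
  | v :: rest =>
    if v = some true then some true
    else if v = none then maybe_orLoop none rest
    else maybe_orLoop result rest

def maybe_or (vs : List (Option Bool)) : Option Bool := maybe_orLoop (some false) vs

-- ===== PORT B =====
-- B: two independent short-circuit scans (list.any is short-circuiting)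
def maybe_or_alt (vs : List (Option Bool)) : Option Bool :=
  if vs.any (fun v => v = some true) then some true
  else if vs.any (fun v => v = none) then none
  else some false

-- ===== PRECONDITION & SPEC =====
def Spec_maybe_or (vs : List (Option Bool)) (out : Option Bool) : Prop := out = maybe_or_alt vs
instance (vs : List (Option Bool)) (out : Option Bool) : Decidable (Spec_maybe_or vs out) := by unfold Spec_maybe_or; infer_instance

-- ===== CLAIM (what is proved, stated in full; the proofs are below) =====
def Claim_equal_maybe_or : Prop := ∀ (vs : List (Option Bool)), Dom_maybe_or vs → Spec_maybe_or vs (maybe_or vs)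

-- ===== LEMMAS AND PROOFS =====

-- ===== VERDICT (by name: the statement is the Claim_ definition above) =====
theorem maybe_orLoop_eq (r : Option Bool) (vs : List (Option Bool)) :
    maybe_orLoop r vs =
      if vs.any (fun v => v = some true) then some true
      else if vs.any (fun v => v = none) then none else r := by
  induction vs generalizing r with
  | nil => simp [maybe_orLoop]
  | cons v rest ih =>
    simp only [maybe_orLoop, List.any_cons]
    rcases v with _ | b
    · simp [ih]
    · rcases b with _ | _ <;> simp [ih]

theorem maybe_or_spec : Claim_equal_maybe_or := by
  intro vs _
  unfold Spec_maybe_or maybe_or maybe_or_alt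
  rw [maybe_orLoop_eq]
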